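-- pv_equiv track=rewrite | github.com/clinton180/Analyzing-SAT-solvers-with-Geometric-Resolution | Comp_499A/Tetris/merger.py | _merge_patterns_once
-- ===== SOURCE A (Python) =====
-- from typing import Dict, Iterable, List, Optional, Set, Tuple, Union
--
-- Bit = Union[int, None]
--
-- Bits = Tuple[Bit, ...]
--
-- def _merge_patterns_once(patterns: Set[Bits], k: int) -> Tuple[Set[Bits], bool]:
--     """
--     One pass of sibling merging over wildcard patterns.
--
--     Two patterns p and q can merge on axis a if:
--       - p and q are identical except at axis a
--       - p[a] and q[a] are 0/1 complements (not wildcard)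
--     Result is same pattern with axis a = None (wildcard).
--     """
--     merged: Set[Bits] = set()
--     used: Set[Bits] = set()
--     changed = False
--
--     # For determinism: iterate axes in order; greedy merge within each axis.
--     for a in range(k):
--         # Group by "key": all coordinates except axis a
--         buckets: Dict[Tuple[Bit, ...], List[Bits]] = {}
--         for p in patterns:
--             if p in used:
--                 continue
--             if p[a] is None:
--                 continue  # can't merge further on this axis if wildcard already
--             key = p[:a] + p[a+1:]
--             buckets.setdefault(key, []).append(p)
--
--         for key, ps in buckets.items():
--             # We want to pair patterns that differ only on axis a: 0 with 1
--             have0 = [p for p in ps if p[a] == 0 and p not in used]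
--             have1 = [p for p in ps if p[a] == 1 and p not in used]
--             # Pair them greedily
--             while have0 and have1:
--                 p0 = have0.pop()
--                 p1 = have1.pop()
--                 used.add(p0)
--                 used.add(p1)
--                 # Create wildcarded pattern
--                 newp = list(p0)
--                 newp[a] = None
--                 merged.add(tuple(newp))
--                 changed = True
--
--     # Any patterns not used in a merge survive
--     survivors = {p for p in patterns if p not in used}
--     # New merged patterns + survivors
--     out = survivors | merged
--     return out, changed
-- ===== SOURCE B (Python) =====
-- def _merge_patterns_once(patterns, k):
--     """One sibling-merge pass: probe each pattern's 0/1 siblings directly in the set."""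
--     merged = set()
--     used = set()
--     changed = False
--     for a in range(k):
--         for p in patterns:
--             if p in used or p[a] is None:
--                 continue
--             q0 = p[:a] + (0,) + p[a+1:]
--             q1 = p[:a] + (1,) + p[a+1:]
--             if q0 in patterns and q0 not in used and q1 in patterns and q1 not in used:
--                 used.add(q0)
--                 used.add(q1)
--                 merged.add(p[:a] + (None,) + p[a+1:])
--                 changed = True
--     survivors = {p for p in patterns if p not in used}
--     return survivors | merged, changed
-- ===== Notes on version B (the rewrite author's own statement) =====
-- stated objective: simpler
-- what changed: B drops A's per-axis group-by-key bucket dict, the per-bucket have0/have1 filter lists and the greedy pairing while-loop, and instead makes a single scan per axis that probes the two 0/1 siblings of each pattern's cell directly in the pattern set.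
-- outside the precondition, e.g. on _merge_patterns_once({(0,), (1,)}, 2): A returns ({(None,)}, True), B returns ({(None,)}, True)
import Mathlib
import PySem

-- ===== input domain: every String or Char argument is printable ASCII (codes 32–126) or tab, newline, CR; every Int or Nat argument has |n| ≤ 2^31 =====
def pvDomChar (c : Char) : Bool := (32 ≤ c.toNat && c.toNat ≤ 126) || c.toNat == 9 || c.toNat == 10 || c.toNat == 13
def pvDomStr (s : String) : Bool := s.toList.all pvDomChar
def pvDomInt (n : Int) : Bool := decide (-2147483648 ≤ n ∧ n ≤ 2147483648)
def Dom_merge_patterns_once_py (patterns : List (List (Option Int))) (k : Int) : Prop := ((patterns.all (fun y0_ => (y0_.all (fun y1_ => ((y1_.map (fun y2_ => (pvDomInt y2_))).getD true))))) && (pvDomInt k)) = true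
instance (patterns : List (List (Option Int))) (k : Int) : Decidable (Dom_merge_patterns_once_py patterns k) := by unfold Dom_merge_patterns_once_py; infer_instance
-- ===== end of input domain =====

-- B drops A's group-by-key bucket dict and pairing loop: one scan per axis probing the two 0/1
-- siblings of each pattern directly in the set (objective: simpler; same exact result).

-- ===== PORT A =====
-- p[a] for 0 ≤ a; the IndexError case (a ≥ len p, `pyGet? = none`) is collapsed to the wildcard
-- value `none`; Pre_ excludes inputs on which the Python would reach such an index.
-- (helper shared by both ports: it is the transliteration of `p[a]` in each.)
def pvBit (a : Nat) (p : List (Option Int)) : Option Int :=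
  (PySem.List.pyGet? p (a : Int)).getD none

-- p[:a] + p[a+1:]  (exact: 0 ≤ a, so the slices are take/drop)
def pvKeyA (a : Nat) (p : List (Option Int)) : List (Option Int) :=
  p.take a ++ p.drop (a + 1)

-- state (merged, used, changed)
abbrev PvSt := PySem.Set (List (Option Int)) × PySem.Set (List (Option Int)) × Bool

-- `while have0 and have1: p0 = have0.pop(); p1 = have1.pop(); …` — pop() takes the LAST element,
-- so the loop consumes the reversed lists front-to-back; newp = list(p0); newp[a] = None is List.set
-- (exact: a < len p0 whenever p0 is in a bucket).
def pvPairLoop (a : Nat) (h0 h1 : List (List (Option Int))) (st : PvSt) : PvSt :=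
  match h0, h1 with
  | p0 :: t0, p1 :: t1 =>
      pvPairLoop a t0 t1
        (PySem.Set.add st.1 (p0.set a none),
         PySem.Set.add (PySem.Set.add st.2.1 p0) p1, true)
  | _, _ => st

-- one iteration of `for a in range(k)`
def pvAxisA (patterns : List (List (Option Int))) (a : Nat) (st : PvSt) : PvSt :=
  let buckets : PySem.Dict (List (Option Int)) (List (List (Option Int))) :=
    patterns.foldl (fun bk p =>
      if PySem.Set.contains st.2.1 p then bk
      else if pvBit a p = none then bk
      else PySem.Dict.modify bk (pvKeyA a p) [] (· ++ [p])) PySem.Dict.empty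
  buckets.items.foldl (fun st' kps =>
    let have0 := kps.2.filter (fun p => pvBit a p == some 0 && !(PySem.Set.contains st'.2.1 p))
    let have1 := kps.2.filter (fun p => pvBit a p == some 1 && !(PySem.Set.contains st'.2.1 p))
    pvPairLoop a have0.reverse have1.reverse st') st

def merge_patterns_once_py (patterns : List (List (Option Int))) (k : Int) : List (List (Option Int)) × Bool :=
  -- range(k) is empty for k ≤ 0, hence k.toNat
  let st := (List.range k.toNat).foldl (fun st a => pvAxisA patterns a st)
              (PySem.Set.empty, PySem.Set.empty, false)
  let survivors := PySem.Set.ofList (patterns.filter (fun p => !(PySem.Set.contains st.2.1 p)))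
  (PySem.Set.union survivors st.1, st.2.2)

-- ===== PORT B =====
-- p[:a] + (b,) + p[a+1:]
def pvPut (a : Nat) (p : List (Option Int)) (b : Option Int) : List (Option Int) :=
  p.take a ++ b :: p.drop (a + 1)

-- body of B's inner `for p in patterns` loop
def pvStepB (patterns : List (List (Option Int))) (a : Nat) (st : PvSt) (p : List (Option Int)) : PvSt :=
  if PySem.Set.contains st.2.1 p || pvBit a p == none then st
  else
    let q0 := pvPut a p (some 0)
    let q1 := pvPut a p (some 1)
    if patterns.contains q0 && !(PySem.Set.contains st.2.1 q0)
        && patterns.contains q1 && !(PySem.Set.contains st.2.1 q1) then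
      (PySem.Set.add st.1 (pvPut a p none),
       PySem.Set.add (PySem.Set.add st.2.1 q0) q1, true)
    else st

def merge_patterns_once_py_alt (patterns : List (List (Option Int))) (k : Int) : List (List (Option Int)) × Bool :=
  let st := (List.range k.toNat).foldl
      (fun st a => patterns.foldl (pvStepB patterns a) st)
      (PySem.Set.empty, PySem.Set.empty, false)
  (PySem.Set.union (PySem.Set.ofList (patterns.filter (fun p => !(PySem.Set.contains st.2.1 p)))) st.1, st.2.2)

-- ===== PRECONDITION & SPEC =====
-- `patterns` encodes a Python set of tuples, so its list encoding holds distinct elements (Nodup).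
-- The length bound excludes the IndexError of `p[a]`: a pattern shorter than k raises. It also
-- excludes the rare inputs where every too-short pattern is merged away (hence skipped) before an
-- axis reaches its length, on which A still returns — see the claim's cites.
def Pre_merge_patterns_once_py (patterns : List (List (Option Int))) (k : Int) : Prop :=
  patterns.Nodup ∧ ∀ p ∈ patterns, k ≤ (p.length : Int)
instance (patterns : List (List (Option Int))) (k : Int) : Decidable (Pre_merge_patterns_once_py patterns k) := by unfold Pre_merge_patterns_once_py; infer_instance

def pvWitness_merge_patterns_once_py : List (List (Option Int)) × Int :=
  ([[some 0, some 1], [some 1, some 1], [some 0, none]], 2)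

def Spec_merge_patterns_once_py (patterns : List (List (Option Int))) (k : Int) (out : List (List (Option Int)) × Bool) : Prop := out = merge_patterns_once_py_alt patterns k
instance (patterns : List (List (Option Int))) (k : Int) (out : List (List (Option Int)) × Bool) : Decidable (Spec_merge_patterns_once_py patterns k out) := by unfold Spec_merge_patterns_once_py; infer_instance

-- ===== CLAIM (what is proved, stated in full; the proofs are below) =====
def Claim_equal_merge_patterns_once_py : Prop := ∀ (patterns : List (List (Option Int))) (k : Int), Dom_merge_patterns_once_py patterns k → Pre_merge_patterns_once_py patterns k → Spec_merge_patterns_once_py patterns k (merge_patterns_once_py patterns k)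

-- ===== LEMMAS AND PROOFS =====

-- the pattern of the cell `K` (a key) with value b at axis a
def pvQ (a : Nat) (K : List (Option Int)) (b : Option Int) : List (Option Int) :=
  K.take a ++ b :: K.drop a

-- eligibility at axis a w.r.t. the used-set U0 at the start of the axis
def pvElig (a : Nat) (U0 : List (List (Option Int))) (p : List (Option Int)) : Bool :=
  !(PySem.Set.contains U0 p) && !(pvBit a p == none)

-- whether the cell K merges at this axis (both siblings present and unused at axis start)
def pvFired (a : Nat) (L U0 : List (List (Option Int))) (K : List (Option Int)) : Bool :=
  L.contains (pvQ a K (some 0)) && !(PySem.Set.contains U0 (pvQ a K (some 0)))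
  && L.contains (pvQ a K (some 1)) && !(PySem.Set.contains U0 (pvQ a K (some 1)))

-- canonical action of one cell on the state
def pvAct (a : Nat) (L U0 : List (List (Option Int))) (st : PvSt) (K : List (Option Int)) : PvSt :=
  if pvFired a L U0 K then
    (PySem.Set.add st.1 (pvQ a K none),
     PySem.Set.add (PySem.Set.add st.2.1 (pvQ a K (some 0))) (pvQ a K (some 1)), true)
  else st

-- the ordered distinct keys of the eligible patterns of L
def pvKeys (a : Nat) (U0 L : List (List (Option Int))) : List (List (Option Int)) :=
  PySem.Set.ofList ((L.filter (pvElig a U0)).map (pvKeyA a))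



-- ---- splitting an append at the length of its left part ----

lemma pvTakeApp {n : Nat} (xs ys : List (Option Int)) (h : n = xs.length) :
    (xs ++ ys).take n = xs := by subst h; exact List.take_left

lemma pvDropApp {n : Nat} (xs ys : List (Option Int)) (h : n = xs.length) :
    (xs ++ ys).drop n = ys := by subst h; simp

lemma pvDropApp1 {n : Nat} (xs ys : List (Option Int)) (v : Option Int) (h : n = xs.length) :
    (xs ++ v :: ys).drop (n + 1) = ys := by subst h; simp [List.drop_append]

lemma pvSetApp {n : Nat} (xs ys : List (Option Int)) (v w : Option Int) (h : n = xs.length) :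
    (xs ++ v :: ys).set n w = xs ++ w :: ys := by subst h; simp

lemma pvGetApp {n : Nat} (xs ys : List (Option Int)) (v : Option Int) (h : n = xs.length) :
    (xs ++ v :: ys)[n]? = some v := by subst h; simp

-- ---- basic facts about pvBit / pvKeyA / pvQ / pvPut ----

lemma pvBit_eq (a : Nat) (p : List (Option Int)) : pvBit a p = (p[a]?).getD none := by
  simp [pvBit, pysem]

lemma pvTakeLen {a : Nat} {p : List (Option Int)} (h : a ≤ p.length) :
    (p.take a).length = a := by simp; omega

lemma pvBit_some {a : Nat} {p : List (Option Int)} {b : Int}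
    (h : pvBit a p = some b) : a < p.length ∧ p[a]? = some (some b) := by
  rw [pvBit_eq] at h
  cases hg : p[a]? with
  | none => rw [hg] at h; simp at h
  | some w =>
    rw [hg] at h
    simp at h
    obtain ⟨hlt, -⟩ := List.getElem?_eq_some_iff.mp hg
    exact ⟨hlt, by simp [h]⟩

lemma pvBit_ne_none {a : Nat} {p : List (Option Int)}
    (h : ¬ pvBit a p = none) : a < p.length := by
  rw [pvBit_eq] at h
  by_contra hlt
  rw [List.getElem?_eq_none (by omega)] at h
  simp at h

lemma pvRecon {a : Nat} {p : List (Option Int)} {b : Int}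
    (h : pvBit a p = some b) : p = p.take a ++ some b :: p.drop (a + 1) := by
  obtain ⟨hlt, hg⟩ := pvBit_some h
  have hb : p[a] = some b := by
    rw [List.getElem?_eq_getElem hlt] at hg
    exact Option.some_injective _ hg
  conv_lhs => rw [← List.take_append_drop a p, ← List.getElem_cons_drop hlt, hb]

lemma pvQ_of_key {a : Nat} {p : List (Option Int)} (b : Option Int) (h : a ≤ p.length) :
    pvQ a (pvKeyA a p) b = p.take a ++ b :: p.drop (a + 1) := by
  unfold pvQ pvKeyA
  rw [pvTakeApp _ _ (pvTakeLen h).symm, pvDropApp _ _ (pvTakeLen h).symm]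

lemma pvQ_key {a : Nat} {K : List (Option Int)} (b : Option Int) (h : a ≤ K.length) :
    pvKeyA a (pvQ a K b) = K := by
  unfold pvKeyA pvQ
  rw [pvTakeApp _ _ (pvTakeLen h).symm, pvDropApp1 _ _ _ (pvTakeLen h).symm]
  exact List.take_append_drop a K

lemma pvBit_pvQ {a : Nat} {K : List (Option Int)} (b : Option Int) (h : a ≤ K.length) :
    pvBit a (pvQ a K b) = b := by
  rw [pvBit_eq, pvQ, pvGetApp _ _ _ (pvTakeLen h).symm]
  rfl

lemma pvKey_len {a : Nat} {p : List (Option Int)} (h : a < p.length) :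
    a ≤ (pvKeyA a p).length := by
  simp [pvKeyA]; omega

lemma pvDecomp {a : Nat} {p : List (Option Int)} {b : Int}
    (h : pvBit a p = some b) : p = pvQ a (pvKeyA a p) (some b) := by
  rw [pvQ_of_key _ (le_of_lt (pvBit_some h).1)]
  exact pvRecon h

lemma pvPut_eq_pvQ {a : Nat} {p : List (Option Int)} (b : Option Int) (h : a ≤ p.length) :
    pvPut a p b = pvQ a (pvKeyA a p) b := by
  rw [pvQ_of_key _ h]; rfl

lemma pvSet_pvQ {a : Nat} {K : List (Option Int)} (b : Option Int) (h : a ≤ K.length) :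
    (pvQ a K b).set a none = pvQ a K none := by
  unfold pvQ
  rw [pvSetApp _ _ _ _ (pvTakeLen h).symm]

-- ---- the used-set after acting a list of keys ----

lemma pvUsed_foldl (a : Nat) (L U0 : List (List (Option Int))) :
    ∀ (KS : List (List (Option Int))) (st : PvSt) (x : List (Option Int)),
      x ∈ (KS.foldl (pvAct a L U0) st).2.1 ↔
        x ∈ st.2.1 ∨ ∃ K ∈ KS, pvFired a L U0 K = true ∧
          (x = pvQ a K (some 0) ∨ x = pvQ a K (some 1)) := by
  intro KS
  induction KS with
  | nil => simp
  | cons K KS ih =>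
    intro st x
    simp only [List.foldl_cons]
    rw [ih]
    unfold pvAct
    by_cases hf : pvFired a L U0 K = true
    · simp [hf, PySem.Set.mem_add, exists_eq_or_imp]
      constructor
      · rintro (((h | h) | h) | h)
        · exact Or.inl h
        · exact Or.inr (Or.inl (Or.inl h))
        · exact Or.inr (Or.inl (Or.inr h))
        · exact Or.inr (Or.inr h)
      · rintro (h | ((h | h) | h))
        · exact Or.inl (Or.inl (Or.inl h))
        · exact Or.inl (Or.inl (Or.inr h))
        · exact Or.inl (Or.inr h)
        · exact Or.inr h
    · simp [hf, exists_eq_or_imp]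

-- ---- filtering a Nodup list whose matches are all one value ----

lemma pvFilterNodup {α : Type} [DecidableEq α] (l : List α) (pred : α → Bool) (c : α)
    (hn : l.Nodup) (hu : ∀ x ∈ l, pred x = true → x = c) :
    l.filter pred = if c ∈ l ∧ pred c = true then [c] else [] := by
  induction l with
  | nil => simp
  | cons y t ih =>
    have hn' := hn.of_cons
    have hy : y ∉ t := (List.nodup_cons.mp hn).1
    have hu' : ∀ x ∈ t, pred x = true → x = c := fun x hx => hu x (by simp [hx])
    cases hp : pred y with
    | false =>
      rw [List.filter_cons_of_neg (by simp [hp]), ih hn' hu']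
      by_cases hcy : c = y
      · subst hcy
        simp [hp, fun h : c ∈ t => hy h]
      · simp [hcy]
    | true =>
      have hyc : y = c := hu y (by simp) hp
      subst hyc
      rw [List.filter_cons_of_pos hp]
      have : t.filter pred = [] := by
        rw [List.filter_eq_nil_iff]
        intro x hx hpx
        exact hy ((hu' x hx hpx) ▸ hx)
      simp [this, hp]

-- ---- the eligible patterns of a given cell ----

def pvPs (a : Nat) (U0 L : List (List (Option Int))) (K : List (Option Int)) :
    List (List (Option Int)) :=
  (L.filter (pvElig a U0)).filter (fun p => pvKeyA a p == K)

lemma pvMem_ps {a : Nat} {U0 L : List (List (Option Int))} {K x : List (Option Int)} :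
    x ∈ pvPs a U0 L K ↔ x ∈ L ∧ ¬ x ∈ U0 ∧ ¬ pvBit a x = none ∧ pvKeyA a x = K := by
  simp [pvPs, pvElig, PySem.Set.contains, List.mem_filter, Option.isSome_iff_ne_none]
  tauto

lemma pvQ_mem_ps {a : Nat} {U0 L : List (List (Option Int))} {K : List (Option Int)} {b : Int}
    (h : a ≤ K.length) :
    pvQ a K (some b) ∈ pvPs a U0 L K ↔ pvQ a K (some b) ∈ L ∧ ¬ pvQ a K (some b) ∈ U0 := by
  rw [pvMem_ps]
  simp [pvBit_pvQ _ h, pvQ_key _ h]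

lemma pvPairLoop_nil_left (a : Nat) (h1 : List (List (Option Int))) (st : PvSt) :
    pvPairLoop a [] h1 st = st := by cases h1 <;> rfl

lemma pvPairLoop_nil_right (a : Nat) (h0 : List (List (Option Int))) (st : PvSt) :
    pvPairLoop a h0 [] st = st := by cases h0 <;> rfl

-- the single-cell step of A's bucket loop equals pvAct
lemma pvBucketStep (a : Nat) (L : List (List (Option Int))) (st0 : PvSt) (hL : L.Nodup)
    (KSd : List (List (Option Int))) (K : List (Option Int))
    (hKlen : a ≤ K.length) (hKd : K ∉ KSd) (hKdlen : ∀ K' ∈ KSd, a ≤ K'.length) :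
    pvPairLoop a
      (((pvPs a st0.2.1 L K).filter (fun p => pvBit a p == some 0 &&
          !(PySem.Set.contains (KSd.foldl (pvAct a L st0.2.1) st0).2.1 p))).reverse)
      (((pvPs a st0.2.1 L K).filter (fun p => pvBit a p == some 1 &&
          !(PySem.Set.contains (KSd.foldl (pvAct a L st0.2.1) st0).2.1 p))).reverse)
      (KSd.foldl (pvAct a L st0.2.1) st0)
    = pvAct a L st0.2.1 (KSd.foldl (pvAct a L st0.2.1) st0) K := by
  set st := KSd.foldl (pvAct a L st0.2.1) st0 with hst
  have hps_notU : ∀ x ∈ pvPs a st0.2.1 L K, ¬ x ∈ st.2.1 := by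
    intro x hx hmem
    obtain ⟨hxL, hxU0, hxbit, hxkey⟩ := pvMem_ps.mp hx
    rw [hst, pvUsed_foldl] at hmem
    rcases hmem with h | ⟨K', hK', hf, hq⟩
    · exact hxU0 h
    · have : pvKeyA a x = K' := by
        rcases hq with rfl | rfl
        · exact pvQ_key _ (hKdlen K' hK')
        · exact pvQ_key _ (hKdlen K' hK')
      exact hKd (hxkey ▸ this ▸ hK')
  have hfc : ∀ (b : Int),
      (pvPs a st0.2.1 L K).filter (fun p => pvBit a p == some b && !(PySem.Set.contains st.2.1 p))
      = (pvPs a st0.2.1 L K).filter (fun p => pvBit a p == some b) := by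
    intro b
    apply List.filter_congr
    intro x hx
    simp [PySem.Set.contains, hps_notU x hx]
  have hps_nodup : (pvPs a st0.2.1 L K).Nodup := (hL.filter _).filter _
  have huniq : ∀ (b : Int), ∀ x ∈ pvPs a st0.2.1 L K,
      (pvBit a x == some b) = true → x = pvQ a K (some b) := by
    intro b x hx hbx
    obtain ⟨-, -, -, hxkey⟩ := pvMem_ps.mp hx
    rw [beq_iff_eq] at hbx
    rw [pvDecomp hbx, hxkey]
  have hfilt : ∀ (b : Int),
      (pvPs a st0.2.1 L K).filter (fun p => pvBit a p == some b)
      = if pvQ a K (some b) ∈ L ∧ ¬ pvQ a K (some b) ∈ st0.2.1 then [pvQ a K (some b)] else [] := by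
    intro b
    rw [pvFilterNodup _ _ _ hps_nodup (huniq b)]
    congr 1
    simp only [eq_iff_iff]
    rw [pvQ_mem_ps hKlen]
    simp [pvBit_pvQ _ hKlen]
  rw [hfc 0, hfc 1, hfilt 0, hfilt 1]
  unfold pvAct pvFired
  by_cases h0 : pvQ a K (some 0) ∈ L ∧ ¬ pvQ a K (some 0) ∈ st0.2.1
  · by_cases h1 : pvQ a K (some 1) ∈ L ∧ ¬ pvQ a K (some 1) ∈ st0.2.1
    · rw [if_pos h0, if_pos h1]
      have hfired : (L.contains (pvQ a K (some 0)) && !(PySem.Set.contains st0.2.1 (pvQ a K (some 0)))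
          && L.contains (pvQ a K (some 1)) && !(PySem.Set.contains st0.2.1 (pvQ a K (some 1)))) = true := by
        simp [PySem.Set.contains, h0.1, h0.2, h1.1, h1.2]
      rw [if_pos hfired]
      simp only [List.reverse_singleton]
      show pvPairLoop a [pvQ a K (some 0)] [pvQ a K (some 1)] st = _
      unfold pvPairLoop
      unfold pvPairLoop
      rw [pvSet_pvQ _ hKlen]
    · rw [if_pos h0, if_neg h1]
      rw [if_neg ?_]
      · simp [pvPairLoop_nil_right]
      · intro hcontra
        simp only [Bool.and_eq_true, Bool.not_eq_eq_eq_not, Bool.not_true,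
          List.contains_eq_mem, decide_eq_true_eq,
          decide_eq_false_iff_not, PySem.Set.contains] at hcontra
        exact h1 ⟨hcontra.1.2, hcontra.2⟩
  · have hc : ¬ ((L.contains (pvQ a K (some 0)) && !(PySem.Set.contains st0.2.1 (pvQ a K (some 0)))
        && L.contains (pvQ a K (some 1)) && !(PySem.Set.contains st0.2.1 (pvQ a K (some 1)))) = true) := by
      intro hcontra
      simp only [Bool.and_eq_true, Bool.not_eq_eq_eq_not, Bool.not_true,
        List.contains_eq_mem, decide_eq_true_eq,
        decide_eq_false_iff_not, PySem.Set.contains] at hcontra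
      exact h0 ⟨hcontra.1.1.1, hcontra.1.1.2⟩
    rw [if_neg h0, if_neg hc]
    simp [pvPairLoop_nil_left]


-- membership in pvKeys gives the length bound
lemma pvKeys_len {a : Nat} {U0 M : List (List (Option Int))} :
    ∀ K ∈ pvKeys a U0 M, a ≤ K.length := by
  intro K hK
  rw [pvKeys, PySem.Set.mem_ofList] at hK
  obtain ⟨x, hx, rfl⟩ := List.mem_map.mp hK
  have hxe := (List.mem_filter.mp hx).2
  have hbit : ¬ pvBit a x = none := by
    simp [pvElig, Option.isSome_iff_ne_none] at hxe
    exact hxe.2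
  exact pvKey_len (pvBit_ne_none hbit)

lemma pvOfList_append (xs : List (List (Option Int))) (y : List (Option Int)) :
    PySem.Set.ofList (xs ++ [y]) = PySem.Set.add (PySem.Set.ofList xs) y := by
  rw [PySem.Set.ofList_eq_foldl, PySem.Set.ofList_eq_foldl, List.foldl_append]
  rfl

-- A's bucket-items fold over already-acted keys equals acting the keys in order
lemma pvMainA_aux (a : Nat) (L : List (List (Option Int))) (st0 : PvSt) (hL : L.Nodup) :
    ∀ (KS KSd : List (List (Option Int))), (KSd ++ KS).Nodup →
      (∀ K ∈ KSd ++ KS, a ≤ K.length) →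
      KS.foldl (fun st K => pvPairLoop a
          (((pvPs a st0.2.1 L K).filter (fun p => pvBit a p == some 0 &&
              !(PySem.Set.contains st.2.1 p))).reverse)
          (((pvPs a st0.2.1 L K).filter (fun p => pvBit a p == some 1 &&
              !(PySem.Set.contains st.2.1 p))).reverse) st)
        (KSd.foldl (pvAct a L st0.2.1) st0)
      = (KSd ++ KS).foldl (pvAct a L st0.2.1) st0 := by
  intro KS
  induction KS with
  | nil => intro KSd _ _; simp
  | cons K KS ih =>
    intro KSd hnd hlen
    have hKd : K ∉ KSd := by
      rcases List.nodup_append.mp hnd with ⟨-, -, hdisj⟩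
      intro hK
      exact hdisj K hK K (by simp) rfl
    have hstep := pvBucketStep a L st0 hL KSd K (hlen K (by simp)) hKd
      (fun K' hK' => hlen K' (by simp [hK']))
    simp only [List.foldl_cons]
    rw [hstep]
    have hact : pvAct a L st0.2.1 (KSd.foldl (pvAct a L st0.2.1) st0) K
        = (KSd ++ [K]).foldl (pvAct a L st0.2.1) st0 := by
      rw [List.foldl_append]
      rfl
    rw [hact, ih (KSd ++ [K]) (by simpa using hnd) (by intro K' h; apply hlen; simpa using h)]
    simp

lemma pvMainA (L : List (List (Option Int))) (a : Nat) (hL : L.Nodup) (st0 : PvSt) :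
    pvAxisA L a st0 = (pvKeys a st0.2.1 L).foldl (pvAct a L st0.2.1) st0 := by
  set E := L.filter (pvElig a st0.2.1) with hE
  set M := E.map (fun p => (pvKeyA a p, p)) with hM
  set D := M.foldl (fun d pr => PySem.Dict.modify d pr.1 [] (· ++ [pr.2])) PySem.Dict.empty with hD
  have hguard : (fun (bk : PySem.Dict (List (Option Int)) (List (List (Option Int)))) p =>
      if PySem.Set.contains st0.2.1 p then bk
      else if pvBit a p = none then bk
      else PySem.Dict.modify bk (pvKeyA a p) [] (· ++ [p]))
      = (fun bk p => if pvElig a st0.2.1 p then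
          PySem.Dict.modify bk (pvKeyA a p) [] (· ++ [p]) else bk) := by
    funext bk p
    unfold pvElig
    by_cases h1 : p ∈ st0.2.1
    · simp [PySem.Set.contains, h1]
    · by_cases h2 : pvBit a p = none
      · simp [PySem.Set.contains, h1, h2]
      · simp [PySem.Set.contains, h1, h2, Option.isSome_iff_ne_none]
  have hbuck : L.foldl (fun bk p =>
      if PySem.Set.contains st0.2.1 p then bk
      else if pvBit a p = none then bk
      else PySem.Dict.modify bk (pvKeyA a p) [] (· ++ [p])) PySem.Dict.empty = D := by
    rw [hguard, PySem.List.foldl_if_eq_foldl_filter, hD, hM, List.foldl_map]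
  have hkeys : D.keys = pvKeys a st0.2.1 L := by
    have h0 := PySem.Dict.keys_foldl_modify_key M (fun pr => pr.1) []
      (fun _ pr v => v ++ [pr.2]) PySem.Dict.empty
    rw [hD, h0, hM, List.map_map]
    rfl
  have hknodup : D.keys.Nodup := by
    rw [hkeys, pvKeys]
    exact PySem.Set.nodup_ofList _
  have hgetD : ∀ K, D.getD K [] = pvPs a st0.2.1 L K := by
    intro K
    have h0 := PySem.Dict.getD_foldl_modify_append M PySem.Dict.empty K
    rw [hD, h0, PySem.Dict.getD_empty, List.nil_append, hM, List.filter_map, List.map_map]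
    rw [show List.map ((fun (x : List (Option Int) × List (Option Int)) => x.2) ∘
          (fun p => (pvKeyA a p, p)))
        (List.filter ((fun (p : List (Option Int) × List (Option Int)) => p.1 == K) ∘
          (fun p => (pvKeyA a p, p))) E)
      = List.map (fun p => p) (List.filter ((fun (p : List (Option Int) × List (Option Int)) =>
          p.1 == K) ∘ (fun p => (pvKeyA a p, p))) E) from rfl, List.map_id']
    rfl
  have hitems2 : D.keys.map (fun K => (K, D.getD K [])) = D.items := by
    have hk : D.keys = D.items.map (·.1) := rfl
    rw [hk, List.map_map]
    have : ∀ pr ∈ D.items, ((fun K => (K, D.getD K [])) ∘ (·.1)) pr = id pr := by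
      intro pr hpr
      have hmem : (pr.1, pr.2) ∈ D.items := by simpa using hpr
      have := PySem.Dict.getD_of_mem_items D hmem hknodup []
      simp [this]
    rw [List.map_congr_left this, List.map_id]
  have hitems : D.items = D.keys.map (fun K => (K, pvPs a st0.2.1 L K)) := by
    rw [← hitems2]
    exact (List.map_congr_left (fun K _ => by rw [hgetD])).symm
  have hstart : pvAxisA L a st0 = D.items.foldl
      (fun st' kps =>
        pvPairLoop a
          ((kps.2.filter (fun p => pvBit a p == some 0 && !(PySem.Set.contains st'.2.1 p))).reverse)
          ((kps.2.filter (fun p => pvBit a p == some 1 && !(PySem.Set.contains st'.2.1 p))).reverse)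
          st') st0 := by
    unfold pvAxisA
    rw [hbuck]
  rw [hstart, hitems, List.foldl_map]
  have hlen : ∀ K ∈ ([] : List (List (Option Int))) ++ D.keys, a ≤ K.length := by
    intro K hK
    have hK' : K ∈ D.keys := by simpa using hK
    rw [hkeys] at hK'
    exact pvKeys_len K hK'
  have := pvMainA_aux a L st0 hL D.keys [] (by simpa using hknodup) hlen
  simp only [List.foldl_nil, List.nil_append] at this
  rw [← hkeys]
  exact this

-- the ordered distinct eligible keys of pre ++ [p]
lemma pvKeys_append (a : Nat) (U0 pre : List (List (Option Int))) (p : List (Option Int)) :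
    pvKeys a U0 (pre ++ [p]) =
      (if pvElig a U0 p = true then PySem.Set.add (pvKeys a U0 pre) (pvKeyA a p)
       else pvKeys a U0 pre) := by
  unfold pvKeys
  rw [List.filter_append]
  by_cases he : pvElig a U0 p = true
  · rw [if_pos he, show List.filter (pvElig a U0) [p] = [p] from by simp [he], List.map_append]
    exact pvOfList_append _ _
  · rw [if_neg he, show List.filter (pvElig a U0) [p] = ([] : List (List (Option Int))) from by
      simp [he]]
    simp

-- pvStepB with its lets expanded
lemma pvStepB_eq (L : List (List (Option Int))) (a : Nat) (st : PvSt) (p : List (Option Int)) :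
    pvStepB L a st p = if PySem.Set.contains st.2.1 p || pvBit a p == none then st
      else if L.contains (pvPut a p (some 0)) && !(PySem.Set.contains st.2.1 (pvPut a p (some 0)))
          && L.contains (pvPut a p (some 1)) && !(PySem.Set.contains st.2.1 (pvPut a p (some 1))) then
        (PySem.Set.add st.1 (pvPut a p none),
         PySem.Set.add (PySem.Set.add st.2.1 (pvPut a p (some 0))) (pvPut a p (some 1)), true)
      else st := rfl

lemma pvMainB_aux (a : Nat) (L : List (List (Option Int))) (st0 : PvSt) :
    ∀ pre : List (List (Option Int)),
      pre.foldl (pvStepB L a) st0 = (pvKeys a st0.2.1 pre).foldl (pvAct a L st0.2.1) st0 := by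
  intro pre
  induction pre using List.reverseRecOn with
  | nil => rfl
  | append_singleton pre p ih =>
    rw [List.foldl_append, List.foldl_cons, List.foldl_nil, ih, pvKeys_append]
    set KS := pvKeys a st0.2.1 pre with hKS
    set st := KS.foldl (pvAct a L st0.2.1) st0 with hstdef
    have hKSlen : ∀ K ∈ KS, a ≤ K.length := fun K hK => pvKeys_len K hK
    have hUsed : ∀ x, x ∈ st.2.1 ↔ x ∈ st0.2.1 ∨ ∃ K ∈ KS, pvFired a L st0.2.1 K = true ∧
        (x = pvQ a K (some 0) ∨ x = pvQ a K (some 1)) := fun x =>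
      pvUsed_foldl a L st0.2.1 KS st0 x
    by_cases he : pvElig a st0.2.1 p = true
    case neg =>
      rw [if_neg he]
      have hor : p ∈ st0.2.1 ∨ pvBit a p = none := by
        by_contra hcon
        rw [not_or] at hcon
        apply he
        simp [pvElig, PySem.Set.contains, hcon.1, hcon.2, Option.isSome_iff_ne_none]
      have hstep : pvStepB L a st p = st := by
        rw [pvStepB_eq, if_pos ?_]
        rcases hor with hg | hg
        · have hmem : p ∈ st.2.1 := (hUsed p).mpr (Or.inl hg)
          simp [PySem.Set.contains, hmem]
        · simp [hg]
      rw [hstep, ← hstdef]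
    case pos =>
      have hpel : ¬ p ∈ st0.2.1 ∧ (pvBit a p).isSome = true := by
        have h := he
        simp [pvElig, PySem.Set.contains] at h
        exact h
      have hpnone : ¬ pvBit a p = none := by
        have h := hpel.2
        simp [Option.isSome_iff_ne_none] at h
        exact h
      have halt : a < p.length := pvBit_ne_none hpnone
      have hput : ∀ b : Option Int, pvPut a p b = pvQ a (pvKeyA a p) b :=
        fun b => pvPut_eq_pvQ b (le_of_lt halt)
      have hkplen : a ≤ (pvKeyA a p).length := pvKey_len halt
      have hmemused_key : p ∈ st.2.1 → pvKeyA a p ∈ KS ∧ pvFired a L st0.2.1 (pvKeyA a p) = true := by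
        intro hp
        rcases (hUsed p).mp hp with h | ⟨K', hK', hf, hq⟩
        · exact absurd h hpel.1
        · have hkey : pvKeyA a p = K' := by
            rcases hq with rfl | rfl <;> exact pvQ_key _ (hKSlen K' hK')
          rw [hkey]; exact ⟨hK', hf⟩
      rw [if_pos he]
      by_cases hkin : pvKeyA a p ∈ KS
      · have hadd : PySem.Set.add KS (pvKeyA a p) = KS := by
          simp [PySem.Set.add, PySem.Set.contains, hkin]
        rw [hadd]
        show pvStepB L a st p = st
        by_cases hpu : p ∈ st.2.1
        · rw [pvStepB_eq, if_pos (by simp [PySem.Set.contains, hpu])]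
        · rw [pvStepB_eq, if_neg (by simp [PySem.Set.contains, hpu, hpnone]), if_neg ?_]
          intro hcontra
          by_cases hfk : pvFired a L st0.2.1 (pvKeyA a p) = true
          · -- the 0-sibling is already used, contradicting the guard
            have hq0used : pvQ a (pvKeyA a p) (some 0) ∈ st.2.1 :=
              (hUsed _).mpr (Or.inr ⟨_, hkin, hfk, Or.inl rfl⟩)
            rw [hput (some 0), hput (some 1)] at hcontra
            simp only [Bool.and_eq_true, PySem.Set.contains, Bool.not_eq_eq_eq_not, Bool.not_true,
              List.contains_eq_mem, decide_eq_true_eq, decide_eq_false_iff_not] at hcontra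
            exact hcontra.1.1.2 hq0used
          · -- the guard would make the cell fire
            rw [hput (some 0), hput (some 1)] at hcontra
            simp only [Bool.and_eq_true, PySem.Set.contains, Bool.not_eq_eq_eq_not, Bool.not_true,
              List.contains_eq_mem, decide_eq_true_eq, decide_eq_false_iff_not] at hcontra
            apply hfk
            unfold pvFired
            have hnu0 : ¬ pvQ a (pvKeyA a p) (some 0) ∈ st0.2.1 :=
              fun h => hcontra.1.1.2 ((hUsed _).mpr (Or.inl h))
            have hnu1 : ¬ pvQ a (pvKeyA a p) (some 1) ∈ st0.2.1 :=
              fun h => hcontra.2 ((hUsed _).mpr (Or.inl h))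
            simp [PySem.Set.contains, hcontra.1.1.1, hcontra.1.2, hnu0, hnu1]
      · have hadd : PySem.Set.add KS (pvKeyA a p) = KS ++ [pvKeyA a p] := by
          simp [PySem.Set.add, PySem.Set.contains, hkin]
        rw [hadd, List.foldl_append, List.foldl_cons, List.foldl_nil]
        show pvStepB L a st p = pvAct a L st0.2.1 st (pvKeyA a p)
        have hpu : ¬ p ∈ st.2.1 := fun hp => hkin (hmemused_key hp).1
        have hqused : ∀ b : Int, PySem.Set.contains st.2.1 (pvQ a (pvKeyA a p) (some b))
            = PySem.Set.contains st0.2.1 (pvQ a (pvKeyA a p) (some b)) := by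
          intro b
          have hiff : pvQ a (pvKeyA a p) (some b) ∈ st.2.1 ↔
              pvQ a (pvKeyA a p) (some b) ∈ st0.2.1 := by
            constructor
            · intro h
              rcases (hUsed _).mp h with h | ⟨K', hK', hf, hq⟩
              · exact h
              · exfalso
                apply hkin
                have h1 : pvKeyA a (pvQ a (pvKeyA a p) (some b)) = pvKeyA a p :=
                  pvQ_key _ hkplen
                have h2 : pvKeyA a (pvQ a (pvKeyA a p) (some b)) = K' := by
                  rcases hq with heq | heq <;> rw [heq, pvQ_key _ (hKSlen K' hK')]
                have h3 : pvKeyA a p = K' := h1.symm.trans h2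
                rw [h3]
                exact hK'
            · intro h
              exact (hUsed _).mpr (Or.inl h)
          simp only [PySem.Set.contains, List.contains_eq_mem]
          exact decide_eq_decide.mpr hiff
        rw [pvStepB_eq, if_neg (by simp [PySem.Set.contains, hpu, hpnone])]
        rw [hput (some 0), hput (some 1), hput none, hqused 0, hqused 1]
        unfold pvAct pvFired
        rfl

lemma pvMainB (L : List (List (Option Int))) (a : Nat) (_hL : L.Nodup) (st0 : PvSt) :
    L.foldl (pvStepB L a) st0 = (pvKeys a st0.2.1 L).foldl (pvAct a L st0.2.1) st0 :=
  pvMainB_aux a L st0 L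

-- ===== VERDICT (by name: the statement is the Claim_ definition above) =====
theorem merge_patterns_once_py_spec : Claim_equal_merge_patterns_once_py := by
  intro patterns k _hDom hPre
  unfold Spec_merge_patterns_once_py
  unfold merge_patterns_once_py merge_patterns_once_py_alt
  have hax : (fun st a => pvAxisA patterns a st)
      = (fun st a => patterns.foldl (pvStepB patterns a) st) := by
    funext st a
    rw [pvMainA patterns a hPre.1 st, pvMainB patterns a hPre.1 st]
  rw [hax]
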